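-- pv_equiv track=rewrite | github.com/tharinduangelo/6.009 | labs/lab5/labdraft.py | valid_neighbors
-- ===== SOURCE A (Python) =====
-- def valid_location(dim, location):
--     """
--     Returns all valid locations given board dimensions
--     """
--     return all(0<=location[i]<dim[i] for i in range(len(dim)))
--
-- def valid_neighbors(dim, loc):
--     '''a'''
--     # point = list(loc)
--     def neighbors_recursion(point):
--         '''a'''
--         neighbors = []
--         # 1-dimension
--         if len(point) == 1:
--             neighbors.append([point[0] - 1])  # left
--             neighbors.append([point[0]])  # current
--             neighbors.append([point[0] + 1])  # right
--             return neighbors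
--
--         # n-dimensional
--         for sub_dimension in neighbors_recursion(point[1:]):
--             neighbors.append([point[0] - 1] + sub_dimension)  # left
--             neighbors.append([point[0]] + sub_dimension)  # center
--             neighbors.append([point[0] + 1] + sub_dimension)  # right
--         return neighbors
--     res = set()
--     for n in neighbors_recursion(list(loc)):
--         if valid_location(dim, n): res.add(tuple(n))
--
--     return res-{loc}
-- ===== SOURCE B (Python) =====
-- def valid_neighbors(dim, loc):
--     '''a'''
--     n = len(loc)
--     res = set()
--     for code in range(3 ** n):
--         c = code
--         cand = []
--         for x in loc:
--             cand.append(x + c % 3 - 1)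
--             c //= 3
--         cand = tuple(cand)
--         if all(0 <= cand[i] < dim[i] for i in range(len(dim))):
--             res.add(cand)
--     res.discard(loc)
--     return res
-- ===== Notes on version B (the rewrite author's own statement) =====
-- stated objective: alternative
-- what changed: Replaces the per-dimension recursion that builds the 3^n neighbor lists by a single iterative loop over base-3 codes 0..3^n-1, decoding each code into an offset vector and filtering in-bounds candidates.
import Mathlib
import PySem

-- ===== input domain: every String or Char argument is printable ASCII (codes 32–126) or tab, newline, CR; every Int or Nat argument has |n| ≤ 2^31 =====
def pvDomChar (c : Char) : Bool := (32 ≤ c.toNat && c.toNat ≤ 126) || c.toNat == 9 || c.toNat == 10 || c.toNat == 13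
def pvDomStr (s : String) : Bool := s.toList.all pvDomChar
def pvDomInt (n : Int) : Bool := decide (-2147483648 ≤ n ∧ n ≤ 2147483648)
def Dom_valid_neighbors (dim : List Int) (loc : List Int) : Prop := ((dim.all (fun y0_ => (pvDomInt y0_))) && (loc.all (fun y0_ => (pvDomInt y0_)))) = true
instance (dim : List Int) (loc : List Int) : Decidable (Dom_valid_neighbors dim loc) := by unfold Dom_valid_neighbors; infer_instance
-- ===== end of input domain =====

-- B replaces A's per-dimension recursion by one iterative loop over base-3 offset codes; same cost, different algorithm (return-value equivalence only).

-- ===== PORT A =====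
-- valid_location(dim, location): all(0<=location[i]<dim[i] for i in range(len(dim))).
-- Out-of-range location[i] (Python IndexError) is rendered as a failing test via getD;
-- exact on Pre_, where every index reached is in range or the generator has already returned False.
def pyValidLocation (dim : List Int) (location : List Int) : Bool :=
  (List.range dim.length).all (fun i =>
    decide (0 ≤ location.getD i 0 ∧ location.getD i 0 < dim.getD i 0))

-- neighbors_recursion(point); Python recurses forever on [], rendered as [] (outside Pre_)
def neighborsRec : List Int → List (List Int)
  | [] => []
  | [p] => [[p - 1], [p], [p + 1]]
  | p :: q :: rest =>
    (neighborsRec (q :: rest)).foldl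
      (fun acc sub => acc ++ [(p - 1) :: sub, p :: sub, (p + 1) :: sub]) []

def valid_neighbors (dim : List Int) (loc : List Int) : List (List Int) :=
  let res : PySem.Set (List Int) :=
    (neighborsRec loc).foldl
      (fun r n => if pyValidLocation dim n then PySem.Set.add r n else r) PySem.Set.empty
  PySem.Set.diff res [loc]

-- ===== PORT B =====
-- the inner 'for x in loc: cand.append(x + c % 3 - 1); c //= 3' loop
def decodeCand : List Int → Int → List Int
  | [], _ => []
  | x :: rest, c => (x + PySem.Int.mod c 3 - 1) :: decodeCand rest (PySem.Int.floordiv c 3)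

def valid_neighbors_alt (dim : List Int) (loc : List Int) : List (List Int) :=
  let res : PySem.Set (List Int) :=
    (PySem.List.pyRange 0 ((3 : Int) ^ loc.length) 1).foldl
      (fun r code =>
        let cand := decodeCand loc code
        if (List.range dim.length).all (fun i =>
            decide (0 ≤ cand.getD i 0 ∧ cand.getD i 0 < dim.getD i 0))
        then PySem.Set.add r cand else r) PySem.Set.empty
  PySem.Set.discard res loc

-- ===== PRECONDITION & SPEC =====
-- Pre_ excludes exactly the inputs where A raises: empty loc (unbounded recursion,
-- RecursionError), and len(dim) > len(loc) when every coordinate of loc has some in-bounds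
-- offset, so some candidate survives its first len(loc) bounds checks and the check then
-- indexes the candidate past its length (IndexError).
def Pre_valid_neighbors (dim : List Int) (loc : List Int) : Prop :=
  loc ≠ [] ∧ (dim.length ≤ loc.length ∨
    ∃ i ∈ List.range loc.length,
      dim.getD i 0 ≤ 0 ∨ loc.getD i 0 + 1 < 0 ∨ dim.getD i 0 ≤ loc.getD i 0 - 1)
instance (dim : List Int) (loc : List Int) : Decidable (Pre_valid_neighbors dim loc) := by
  unfold Pre_valid_neighbors; infer_instance

def pvWitness_valid_neighbors : List Int × List Int := ([2, 2], [0, 0])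

def Spec_valid_neighbors (dim : List Int) (loc : List Int) (out : List (List Int)) : Prop := out = valid_neighbors_alt dim loc
instance (dim : List Int) (loc : List Int) (out : List (List Int)) : Decidable (Spec_valid_neighbors dim loc out) := by unfold Spec_valid_neighbors; infer_instance

-- ===== CLAIM (what is proved, stated in full; the proofs are below) =====
def Claim_equal_valid_neighbors : Prop := ∀ (dim : List Int) (loc : List Int), Dom_valid_neighbors dim loc → Pre_valid_neighbors dim loc → Spec_valid_neighbors dim loc (valid_neighbors dim loc)

-- ===== LEMMAS AND PROOFS =====

-- decoding a composite code 3*q + r peels off digit r and continues with q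
theorem decode_digit (q r : Int) (h0 : 0 ≤ r) (h2 : r < 3) :
    PySem.Int.mod (3 * q + r) 3 = r ∧ PySem.Int.floordiv (3 * q + r) 3 = q := by
  have hfd : PySem.Int.floordiv (3 * q + r) 3 = q := by
    rw [PySem.Int.floordiv_eq_iff_of_pos (by norm_num)]
    constructor <;> nlinarith
  refine ⟨?_, hfd⟩
  have := PySem.Int.floordiv_mul_add_mod (3 * q + r) 3
  omega

-- range(3*m) mapped, as a flatMap over range(m) of the three digit extensions
theorem map_pyRange_three (f : Int → List Int) (m : Nat) :
    (PySem.List.pyRange 0 ((3 : Int) * m) 1).map f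
      = (PySem.List.pyRange 0 (m : Int) 1).flatMap
          (fun q => [f (3 * q), f (3 * q + 1), f (3 * q + 2)]) := by
  induction m with
  | zero => simp [PySem.List.pyRange_one_eq_nil]
  | succ k ih =>
    have h1 : ((3 : Int) * (k + 1 : Nat)) = 3 * k + 3 := by push_cast; ring
    have hsplit : PySem.List.pyRange 0 (3 * (k : Int) + 3) 1
        = PySem.List.pyRange 0 (3 * k) 1 ++ PySem.List.pyRange (3 * k) (3 * k + 3) 1 :=
      PySem.List.pyRange_one_append 0 (3 * k) (3 * k + 3) (by positivity) (by omega)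
    have htail : PySem.List.pyRange (3 * (k : Int)) (3 * k + 3) 1
        = [3 * k, 3 * k + 1, 3 * k + 2] := by
      rw [PySem.List.pyRange_one_cons (by omega), PySem.List.pyRange_one_cons (by omega),
        PySem.List.pyRange_one_cons (by omega), PySem.List.pyRange_one_eq_nil (by omega)]
      norm_num
      ring
    have hsucc : PySem.List.pyRange 0 ((k : Int) + 1) 1
        = PySem.List.pyRange 0 (k : Int) 1 ++ [(k : Int)] :=
      PySem.List.pyRange_one_succ_right (by positivity)
    rw [h1, hsplit, htail, List.map_append]
    push_cast
    rw [hsucc, List.flatMap_append, ih]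
    simp

-- A's recursive neighbor enumeration is B's code decoding, in the same order
theorem neighborsRec_eq_map (loc : List Int) (h : loc ≠ []) :
    neighborsRec loc
      = (PySem.List.pyRange 0 ((3 : Int) ^ loc.length) 1).map (decodeCand loc) := by
  induction loc with
  | nil => exact absurd rfl h
  | cons p rest ih =>
    cases rest with
    | nil =>
      have h3 : PySem.List.pyRange 0 ((3 : Int) ^ (1 : Nat)) 1 = [0, 1, 2] := by decide
      rw [show ([p] : List Int).length = (1 : Nat) from rfl, h3]
      simp only [neighborsRec, decodeCand, List.map]
      norm_num [show PySem.Int.mod 0 3 = 0 from by decide,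
        show PySem.Int.mod 1 3 = 1 from by decide,
        show PySem.Int.mod 2 3 = 2 from by decide]
      ring
    | cons q rs =>
      have hlen : ((3 : Int) ^ (p :: q :: rs).length) = 3 * ((3 ^ (q :: rs).length : Nat) : Int) := by
        push_cast; rw [List.length_cons (a := p)]; ring
      rw [show neighborsRec (p :: q :: rs)
          = (neighborsRec (q :: rs)).foldl
              (fun acc sub => acc ++ [(p - 1) :: sub, p :: sub, (p + 1) :: sub]) [] from rfl,
        PySem.List.foldl_append_eq_flatMap, ih (by simp), hlen, map_pyRange_three]
      rw [List.nil_append, List.flatMap_map]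
      refine List.flatMap_congr (fun c _ => ?_)
      have d0 := decode_digit c 0 (by norm_num) (by norm_num)
      have d1 := decode_digit c 1 (by norm_num) (by norm_num)
      have d2 := decode_digit c 2 (by norm_num) (by norm_num)
      simp only [decodeCand, add_zero] at *
      rw [d0.1, d0.2, d1.1, d1.2, d2.1, d2.2]
      norm_num
      ring

-- Python's res - {loc} is res.discard(loc)
theorem diff_singleton (s : PySem.Set (List Int)) (x : List Int) :
    PySem.Set.diff s [x] = PySem.Set.discard s x := by
  simp only [PySem.Set.diff, PySem.Set.contains_eq_listContains, PySem.Set.discard]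
  exact List.filter_congr (fun y _ => by by_cases h : y = x <;> simp [h])

-- ===== VERDICT (by name: the statement is the Claim_ definition above) =====
theorem valid_neighbors_spec : Claim_equal_valid_neighbors := by
  intro dim loc _ hpre
  unfold Spec_valid_neighbors valid_neighbors valid_neighbors_alt
  rw [neighborsRec_eq_map loc hpre.1, List.foldl_map, diff_singleton]
  rfl
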